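-- pv_equiv track=rewrite | github.com/Tsukasane/FlowModel | flow.py | find_shortest_zero_segment
-- ===== SOURCE A (Python) =====
-- def find_shortest_zero_segment(lst):
--     min_len = float('inf')
--     min_pos = None
--     i = 0
--     n = len(lst)
--     while i < n:
--         if lst[i] == 0:
--             start = i
--             while i < n and lst[i] == 0:
--                 i += 1
--             seg_len = i - start
--             if seg_len > 1 and seg_len < min_len:
--                 min_len = seg_len
--                 min_pos = start
--         else:
--             i += 1
--     if min_pos is not None:
--         return min_len
--     else:
--         return -1
-- ===== SOURCE B (Python) =====
-- def find_shortest_zero_segment(lst):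
--     # Boundary/gap formulation: the maximal zero runs are exactly the gaps
--     # between consecutive nonzero positions (with sentinels -1 and len(lst)),
--     # so list the nonzero indices, turn adjacent pairs into gap lengths,
--     # and take the minimum of the gaps longer than 1.
--     n = len(lst)
--     bounds = [-1] + [i for i, x in enumerate(lst) if x != 0] + [n]
--     gaps = [b - a - 1 for a, b in zip(bounds, bounds[1:]) if b - a - 1 > 1]
--     return min(gaps) if gaps else -1
-- ===== Notes on version B (the rewrite author's own statement) =====
-- stated objective: alternative
-- what changed: Replaces A's nested index/while scan over elements by a boundary/gap formulation: list the nonzero positions with sentinels -1 and len(lst), turn adjacent boundary pairs into gap lengths (the maximal zero runs), filter those > 1 and take min with -1 default.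
import Mathlib
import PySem

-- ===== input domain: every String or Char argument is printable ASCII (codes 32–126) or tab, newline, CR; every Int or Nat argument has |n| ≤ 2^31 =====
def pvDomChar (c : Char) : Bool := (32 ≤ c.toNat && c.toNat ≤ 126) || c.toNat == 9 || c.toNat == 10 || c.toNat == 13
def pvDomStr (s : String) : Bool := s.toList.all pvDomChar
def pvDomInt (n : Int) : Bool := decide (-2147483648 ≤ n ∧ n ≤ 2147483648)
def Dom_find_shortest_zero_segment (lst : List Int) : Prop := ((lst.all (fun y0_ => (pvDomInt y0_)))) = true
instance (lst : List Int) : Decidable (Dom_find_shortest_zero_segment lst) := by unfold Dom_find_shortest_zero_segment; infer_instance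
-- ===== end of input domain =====

-- B lists the nonzero positions (with sentinels) and takes the min of the adjacent-pair gaps > 1, instead of A's nested index/while scan; alternative formulation, same O(n) cost.


-- ===== PORT A =====
-- inner `while i < n and lst[i] == 0`: length of the leading zero run
def pvCountZeros : List Int → Nat
  | [] => 0
  | x :: xs => if x = 0 then pvCountZeros xs + 1 else 0

-- A's `if seg_len > 1 and seg_len < min_len: min_len = seg_len; min_pos = start`.
-- The pair (min_len = inf, min_pos = None) is modeled as `none`; `some v` means
-- min_len = v with min_pos set, and `seg_len < inf` is always true.
-- Here seg_len = c + 1 (c = zeros after the first).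
def pvUpd (c : Nat) (m : Option Int) : Option Int :=
  match m with
  | none => if (1 : Int) < (c : Int) + 1 then some ((c : Int) + 1) else none
  | some v => if (1 : Int) < (c : Int) + 1 ∧ (c : Int) + 1 < v then some ((c : Int) + 1) else some v

-- A's outer while loop
def pvGoA : List Int → Option Int → Option Int
  | [], m => m
  | x :: xs, m =>
    if x = 0 then
      pvGoA (xs.drop (pvCountZeros xs)) (pvUpd (pvCountZeros xs) m)
    else pvGoA xs m
  termination_by l _ => l.length
  decreasing_by all_goals simp

def find_shortest_zero_segment (lst : List Int) : Int :=
  match pvGoA lst none with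
  | some v => v
  | none => -1

-- ===== PORT B =====
def find_shortest_zero_segment_alt (lst : List Int) : Int :=
  let n : Int := PySem.List.len lst
  let bounds : List Int :=
    [-1] ++ ((PySem.List.enumerate lst 0).filter (fun p => p.2 != 0)).map (fun p => p.1) ++ [n]
  let gaps : List Int :=
    ((bounds.zip (PySem.List.slice bounds (some 1) none)).filter
        (fun p => decide (1 < p.2 - p.1 - 1))).map (fun p => p.2 - p.1 - 1)
  match PySem.List.min? gaps (fun x => x) with
  | some m => m
  | none => -1

-- ===== PRECONDITION & SPEC =====
def Spec_find_shortest_zero_segment (lst : List Int) (out : Int) : Prop := out = find_shortest_zero_segment_alt lst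
instance (lst : List Int) (out : Int) : Decidable (Spec_find_shortest_zero_segment lst out) := by unfold Spec_find_shortest_zero_segment; infer_instance

-- ===== CLAIM (what is proved, stated in full; the proofs are below) =====
def Claim_equal_find_shortest_zero_segment : Prop := ∀ (lst : List Int), Dom_find_shortest_zero_segment lst → Spec_find_shortest_zero_segment lst (find_shortest_zero_segment lst)

-- ===== LEMMAS AND PROOFS =====

-- reference: lengths of the maximal zero runs, in order
def pvRuns : List Int → List Nat
  | [] => []
  | x :: xs =>
    if x = 0 then (pvCountZeros xs + 1) :: pvRuns (xs.drop (pvCountZeros xs)) else pvRuns xs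
  termination_by l => l.length
  decreasing_by all_goals simp

-- qualifying run lengths (those > 1), as Ints
def pvQ (xs : List Int) : List Int :=
  ((pvRuns xs).map Int.ofNat).filter (fun v => decide (1 < v))

-- running first-minimum step (A's min_len/min_pos state through the option)
def pvStep (m : Option Int) (v : Int) : Option Int :=
  match m with
  | none => some v
  | some w => if v < w then some v else some w

-- nonzero positions of xs, indexed from i
def pvNz : Int → List Int → List Int
  | _, [] => []
  | i, x :: xs => if x = 0 then pvNz (i + 1) xs else i :: pvNz (i + 1) xs

-- adjacent pairs of (p :: M)
def pvChain : Int → List Int → List (Int × Int)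
  | _, [] => []
  | p, b :: r => (p, b) :: pvChain b r

-- after dropping the leading zero run, the list is empty or starts with a nonzero
theorem pvDrop_head (xs : List Int) :
    xs.drop (pvCountZeros xs) = [] ∨
      ∃ y rest, xs.drop (pvCountZeros xs) = y :: rest ∧ y ≠ 0 := by
  induction xs with
  | nil => left; simp
  | cons x xs ih =>
    by_cases hx : x = 0
    · simpa [pvCountZeros, hx] using ih
    · right; exact ⟨x, xs, by simp [pvCountZeros, hx], hx⟩

theorem pvUpd_eq_step (c : Nat) (m : Option Int) :
    pvUpd c m = if (1 : Int) < (c : Int) + 1 then pvStep m ((c : Int) + 1) else m := by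
  cases m with
  | none => simp [pvUpd, pvStep]
  | some w =>
    simp only [pvUpd, pvStep]
    split_ifs <;> simp_all

-- A's loop is the first-minimum fold over the qualifying run lengths
theorem pvGoA_eq_fold : ∀ (n : Nat) (xs : List Int) (m : Option Int), xs.length ≤ n →
    pvGoA xs m = (pvQ xs).foldl pvStep m := by
  intro n
  induction n with
  | zero =>
    intro xs m hlen
    have hx : xs = [] := by cases xs <;> simp_all
    subst hx; simp [pvGoA, pvQ, pvRuns]
  | succ n ih =>
    intro xs m hlen
    cases xs with
    | nil => simp [pvGoA, pvQ, pvRuns]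
    | cons x xs =>
      by_cases hx : x = 0
      · subst hx
        have hA : pvGoA (0 :: xs) m =
            pvGoA (xs.drop (pvCountZeros xs)) (pvUpd (pvCountZeros xs) m) := by
          rw [pvGoA.eq_def]; simp
        have hR : pvRuns ((0 : Int) :: xs) =
            (pvCountZeros xs + 1) :: pvRuns (xs.drop (pvCountZeros xs)) := by
          rw [pvRuns.eq_def]; simp
        have hlen' : (xs.drop (pvCountZeros xs)).length ≤ n := by
          simp at hlen ⊢; omega
        rw [hA, ih _ _ hlen', pvUpd_eq_step]
        simp only [pvQ, hR, List.map_cons, List.filter_cons, Int.ofNat_eq_natCast,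
          Nat.cast_add, Nat.cast_one, decide_eq_true_eq]
        split_ifs with h
        · simp
        · simp
      · have hA : pvGoA (x :: xs) m = pvGoA xs m := by rw [pvGoA.eq_def]; simp [hx]
        have hR : pvRuns (x :: xs) = pvRuns xs := by rw [pvRuns.eq_def]; simp [hx]
        rw [hA, ih _ _ (by simp at hlen; omega)]
        simp [pvQ, hR]

-- folding pvStep from `some a` is the running minimum
theorem pvFold_some (t : List Int) : ∀ (a : Int),
    t.foldl pvStep (some a) = some (t.foldl min a) := by
  induction t with
  | nil => intro a; simp
  | cons v t ih =>
    intro a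
    have : pvStep (some a) v = some (min a v) := by
      simp only [pvStep]
      by_cases h : v < a
      · rw [if_pos h, min_eq_right (le_of_lt h)]
      · rw [if_neg h, min_eq_left (by omega)]
    rw [List.foldl_cons, this, ih, List.foldl_cons]

-- B's enumerate/filter/map pass computes the nonzero positions
theorem pvEnum_nz (xs : List Int) : ∀ (s : Int),
    ((PySem.List.enumerate xs s).filter (fun p => p.2 != 0)).map (fun p => p.1) = pvNz s xs := by
  induction xs with
  | nil => intro s; simp [PySem.List.enumerate_nil, pvNz]
  | cons x xs ih =>
    intro s
    rw [PySem.List.enumerate_cons]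
    by_cases hx : x = 0
    · simp [hx, pvNz, ih]
    · simp [hx, pvNz, ih]

-- zipping a list with its tail is the adjacent-pair chain
theorem pvZip_chain (M : List Int) : ∀ (p : Int), (p :: M).zip M = pvChain p M := by
  induction M with
  | nil => intro p; simp [pvChain]
  | cons b r ih => intro p; simp [pvChain, ← ih b]

-- the zero count is absorbed into the start index of pvNz
theorem pvNz_drop (xs : List Int) : ∀ (i : Int),
    pvNz i xs = pvNz (i + pvCountZeros xs) (xs.drop (pvCountZeros xs)) := by
  induction xs with
  | nil => intro i; simp [pvCountZeros]
  | cons x xs ih =>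
    intro i
    by_cases hx : x = 0
    · have : pvNz i (x :: xs) = pvNz (i + 1) xs := by simp [pvNz, hx]
      rw [this, ih (i + 1)]
      have hc : pvCountZeros (x :: xs) = pvCountZeros xs + 1 := by simp [pvCountZeros, hx]
      rw [hc]
      have : (x :: xs).drop (pvCountZeros xs + 1) = xs.drop (pvCountZeros xs) := by simp
      rw [this]
      congr 1
      push_cast; ring
    · simp [pvCountZeros, hx]

-- zero-run length never exceeds the list length
theorem pvCountZeros_le (xs : List Int) : pvCountZeros xs ≤ xs.length := by
  induction xs with
  | nil => simp [pvCountZeros]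
  | cons z zs ihz =>
    by_cases hz : z = 0
    · simp [pvCountZeros, hz]; omega
    · simp [pvCountZeros, hz]

-- core: gaps > 1 between consecutive boundaries are exactly the qualifying run lengths
theorem pvGaps_eq_Q : ∀ (n : Nat) (xs : List Int) (i : Int), xs.length ≤ n →
    ((pvChain (i - 1) (pvNz i xs ++ [i + xs.length])).filter
        (fun p => decide (1 < p.2 - p.1 - 1))).map (fun p => p.2 - p.1 - 1) = pvQ xs := by
  intro n
  induction n with
  | zero =>
    intro xs i hlen
    have hx : xs = [] := by cases xs <;> simp_all
    subst hx
    simp [pvNz, pvChain, pvQ, pvRuns]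
  | succ n ih =>
    intro xs i hlen
    cases xs with
    | nil => simp [pvNz, pvChain, pvQ, pvRuns]
    | cons x xs =>
      by_cases hx : x = 0
      · subst hx
        have hR : pvRuns ((0 : Int) :: xs) =
            (pvCountZeros xs + 1) :: pvRuns (xs.drop (pvCountZeros xs)) := by
          rw [pvRuns.eq_def]; simp
        have hnz : pvNz i ((0 : Int) :: xs) =
            pvNz (i + 1 + (pvCountZeros xs : Int)) (xs.drop (pvCountZeros xs)) := by
          have h1 : pvNz i ((0 : Int) :: xs) = pvNz (i + 1) xs := by simp [pvNz]
          rw [h1, pvNz_drop xs (i + 1)]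
        have hlenc : pvCountZeros xs ≤ xs.length := pvCountZeros_le xs
        have hend : i + ((((0 : Int) :: xs).length : Nat) : Int) =
            (i + 1 + (pvCountZeros xs : Int)) + ((xs.drop (pvCountZeros xs)).length : Int) := by
          have hdl : (xs.drop (pvCountZeros xs)).length = xs.length - pvCountZeros xs := by simp
          rw [hdl]
          push_cast [List.length_cons, Nat.cast_sub hlenc]
          ring
        rcases pvDrop_head xs with hnil | ⟨y, rest, hd, hy⟩
        · -- the whole remaining list is zeros
          rw [hnz, hend, hnil]
          simp only [pvNz, List.length_nil, Nat.cast_zero, add_zero, List.nil_append]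
          have hgap : i + 1 + (pvCountZeros xs : Int) - (i - 1) - 1 = (pvCountZeros xs : Int) + 1 := by
            ring
          simp only [pvChain, List.filter_cons, List.filter_nil, hgap]
          unfold pvQ
          rw [hR, hnil]
          simp only [pvRuns, List.map_cons, List.map_nil, List.filter_cons, List.filter_nil,
            Int.ofNat_eq_natCast, Nat.cast_add, Nat.cast_one, decide_eq_true_eq]
          split_ifs with h
          · simp [hgap]
          · simp
        · have hlen' : rest.length ≤ n := by
            have h2 := congrArg List.length hd
            simp at h2 hlen
            omega
          have hnzr : pvNz (i + 1 + (pvCountZeros xs : Int)) (xs.drop (pvCountZeros xs)) =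
              (i + 1 + (pvCountZeros xs : Int)) ::
                pvNz (i + 1 + (pvCountZeros xs : Int) + 1) rest := by
            rw [hd]; simp [pvNz, hy]
          have hendr : (i + 1 + (pvCountZeros xs : Int)) + ((xs.drop (pvCountZeros xs)).length : Int) =
              (i + 1 + (pvCountZeros xs : Int) + 1) + (rest.length : Int) := by
            rw [hd]; push_cast [List.length_cons]; ring
          rw [hnz, hnzr, hend, hendr]
          simp only [List.cons_append, pvChain]
          have hgap : i + 1 + (pvCountZeros xs : Int) - (i - 1) - 1 = (pvCountZeros xs : Int) + 1 := by
            ring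
          simp only [List.filter_cons, hgap, decide_eq_true_eq]
          have hrec := ih rest (i + 1 + (pvCountZeros xs : Int) + 1) hlen'
          have hj1 : i + 1 + (pvCountZeros xs : Int) + 1 - 1 = i + 1 + (pvCountZeros xs : Int) := by
            ring
          rw [hj1] at hrec
          have hQr : pvQ (xs.drop (pvCountZeros xs)) = pvQ rest := by
            unfold pvQ
            rw [hd]
            have : pvRuns (y :: rest) = pvRuns rest := by rw [pvRuns.eq_def]; simp [hy]
            rw [this]
          unfold pvQ
          rw [hR]
          simp only [List.map_cons, List.filter_cons, Int.ofNat_eq_natCast,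
            Nat.cast_add, Nat.cast_one, decide_eq_true_eq]
          split_ifs with h
          · simp only [List.map_cons, hgap]
            rw [hrec]
            unfold pvQ at hQr ⊢
            rw [← hQr, hd]
          · rw [hrec]
            unfold pvQ at hQr ⊢
            rw [← hQr, hd]
      · have hnz : pvNz i (x :: xs) = i :: pvNz (i + 1) xs := by simp [pvNz, hx]
        have hend : i + ((((x :: xs).length : Nat)) : Int) = (i + 1) + (xs.length : Int) := by
          push_cast [List.length_cons]; ring
        have hR : pvRuns (x :: xs) = pvRuns xs := by rw [pvRuns.eq_def]; simp [hx]
        rw [hnz, hend]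
        simp only [List.cons_append, pvChain, List.filter_cons]
        have hgap0 : ¬ (1 < i - (i - 1) - 1) := by omega
        simp only [decide_eq_true_eq, hgap0, if_false]
        have hrec := ih xs (i + 1) (by simp at hlen; omega)
        have hj1 : i + 1 - 1 = i := by ring
        rw [hj1] at hrec
        rw [hrec]
        unfold pvQ
        rw [hR]

-- ===== VERDICT (by name: the statement is the Claim_ definition above) =====
theorem find_shortest_zero_segment_spec : Claim_equal_find_shortest_zero_segment := by
  intro lst _
  unfold Spec_find_shortest_zero_segment find_shortest_zero_segment
  simp only [find_shortest_zero_segment_alt]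
  rw [pvGoA_eq_fold lst.length lst none le_rfl]
  rw [PySem.List.slice_from_one]
  have hb : ([-1] ++ ((PySem.List.enumerate lst 0).filter (fun p => p.2 != 0)).map (fun p => p.1) ++ [PySem.List.len lst])
      = (-1) :: (pvNz 0 lst ++ [(lst.length : Int)]) := by
    rw [pvEnum_nz lst 0]
    simp [PySem.List.len_eq]
  rw [hb]
  simp only [List.tail_cons]
  rw [pvZip_chain]
  have hg := pvGaps_eq_Q lst.length lst 0 le_rfl
  simp only [zero_sub, zero_add] at hg
  rw [hg]
  cases hq : pvQ lst with
  | nil => rfl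
  | cons a t =>
    rw [List.foldl_cons]
    have h1 : pvStep none a = some a := rfl
    rw [h1, pvFold_some, PySem.List.min?_id_cons]
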